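-- pv_equiv track=rewrite | github.com/cyber-meow/anime_screenshot_pipeline | anime2sd/tagging.py | remove_overlap_tags
-- ===== SOURCE A (Python) =====
-- def remove_overlap_tags(tags, overlap_tags_dict):
--     """
--     Removes overlap tags from the list of tags.
--
--     :param tags: List or Dictionary of tags.
--     :param overlap_tags_dict: Dictionary with overlap tag information.
--         Assume here to take the underscore format
--     :return: A list or dictionary with overlap tags removed.
--     """
--     # If tags is a dictionary, extract the keys for processing
--     # and remember to return a dictionary
--     return_as_dict = False
--     original_tags = tags
--     if isinstance(tags, dict):
--         return_as_dict = True
--         tags = list(tags.keys())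
--
--     result_tags = []
--     tags_underscore = [tag.replace(' ', '_') for tag in tags]
--
--     for tag, tag_ in zip(tags, tags_underscore):
--
--         to_remove = False
--
--         # Case 1: If the tag is a key and some of
--         # the associated values are in tags
--         if tag_ in overlap_tags_dict:
--             overlap_values = set(
--                 val for val in overlap_tags_dict[tag_])
--             if overlap_values.intersection(set(tags_underscore)):
--                 to_remove = True
--
--         # Checking superword condition separately
--         for tag_another in tags:
--             if tag in tag_another and tag != tag_another:
--                 to_remove = True
--                 break
--
--         if not to_remove:
--             result_tags.append(tag)
--
--     # If the input was a dictionary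
--     # return as a dictionary with the same values
--     if return_as_dict:
--         result_tags = {tag: original_tags[tag] for tag in result_tags}
--
--     return result_tags
-- ===== SOURCE B (Python) =====
-- def remove_overlap_tags(tags, overlap_tags_dict):
--     """Same result as the original: drop a tag if its underscore form is a key of
--     overlap_tags_dict with some value present among the tags (underscored), or if
--     it is a proper substring of another tag.  Re-implemented with a precomputed
--     substring index: one pass builds the set of all proper substrings of all tags,
--     so each tag is then tested by a single hash lookup instead of scanning every
--     other tag."""
--     return_as_dict = isinstance(tags, dict)
--     original_tags = tags
--     if return_as_dict:
--         tags = list(tags.keys())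
--
--     under = [t.replace(' ', '_') for t in tags]
--     under_set = frozenset(under)
--
--     # every substring of a tag that is strictly shorter than that tag
--     subs = set()
--     for o in tags:
--         n = len(o)
--         for i in range(n + 1):
--             for j in range(i, n + 1):
--                 if j - i < n:
--                     subs.add(o[i:j])
--
--     kept = []
--     for t, tu in zip(tags, under):
--         if t in subs:
--             continue
--         vals = overlap_tags_dict.get(tu)
--         if vals is not None and not under_set.isdisjoint(vals):
--             continue
--         kept.append(t)
--
--     if return_as_dict:
--         return {t: original_tags[t] for t in kept}
--     return kept
-- ===== Notes on version B (the rewrite author's own statement) =====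
-- stated objective: faster
-- what changed: Instead of scanning all other tags for each tag (and rebuilding the underscore set inside the loop), B precomputes the underscore set once and builds a hash set of all proper substrings of all tags in one pass, so each tag's removal test is O(1) hash lookups.
import Mathlib
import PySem

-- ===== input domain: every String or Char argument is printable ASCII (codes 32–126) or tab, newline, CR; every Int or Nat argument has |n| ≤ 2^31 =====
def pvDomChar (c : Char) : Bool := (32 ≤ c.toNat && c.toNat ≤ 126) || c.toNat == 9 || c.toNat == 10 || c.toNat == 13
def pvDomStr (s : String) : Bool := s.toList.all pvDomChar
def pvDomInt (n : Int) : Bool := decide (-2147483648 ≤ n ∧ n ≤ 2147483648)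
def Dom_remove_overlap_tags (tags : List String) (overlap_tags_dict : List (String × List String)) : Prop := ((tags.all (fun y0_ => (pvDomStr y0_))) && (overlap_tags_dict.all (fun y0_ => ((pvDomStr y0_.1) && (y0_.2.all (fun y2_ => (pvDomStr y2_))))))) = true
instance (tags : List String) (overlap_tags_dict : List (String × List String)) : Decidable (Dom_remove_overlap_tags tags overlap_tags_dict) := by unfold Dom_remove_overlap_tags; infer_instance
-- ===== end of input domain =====

-- B replaces A's per-tag scan over all other tags by a hash-set of all proper substrings
-- built once, and precomputes the underscore set once (objective: faster).


-- ===== PORT A =====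
-- 'tags' is a list here, so A's isinstance(dict) branch never fires.
def remove_overlap_tags (tags : List String) (overlap_tags_dict : List (String × List String)) : List String :=
  let d : PySem.Dict String (List String) := PySem.Dict.ofList overlap_tags_dict
  let tags_underscore : List String := tags.map (fun tag => PySem.Str.replace tag " " "_")
  (tags.zip tags_underscore).foldl
    (fun result_tags p =>
      let tag := p.1
      let tag_ := p.2
      let to_remove := false
      -- Case 1: tag_ is a key and some associated value is among tags_underscore
      let to_remove :=
        if d.contains tag_ then
          let overlap_values := PySem.Set.ofList (d.getD tag_ [])
          if PySem.Set.inter overlap_values (PySem.Set.ofList tags_underscore) ≠ [] then true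
          else to_remove
        else to_remove
      -- superword for-loop with break, as the flag it computes
      let to_remove := to_remove ||
        tags.any (fun tag_another => PySem.Str.isIn tag tag_another && tag != tag_another)
      if !to_remove then result_tags ++ [tag] else result_tags)
    []

-- ===== PORT B =====
-- Source B's nested i/j loops adding every substring of o strictly shorter than o;
-- range(i, n+1) is List.range' i (n+1-i), and o[i:j] with 0 ≤ i ≤ j is (o.drop i).take (j-i) (exact here).
def pvAddProperSubs (acc : PySem.Set (List Char)) (o : List Char) : PySem.Set (List Char) :=
  let n := o.length
  (List.range (n + 1)).foldl
    (fun acc i =>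
      (List.range' i (n + 1 - i)).foldl
        (fun acc j =>
          if j - i < n then PySem.Set.add acc ((o.drop i).take (j - i)) else acc)
        acc)
    acc

def remove_overlap_tags_alt (tags : List String) (overlap_tags_dict : List (String × List String)) : List String :=
  let d : PySem.Dict String (List String) := PySem.Dict.ofList overlap_tags_dict
  let under : List String := tags.map (fun t => PySem.Str.replace t " " "_")
  let under_set : PySem.Set String := PySem.Set.ofList under
  let subs : PySem.Set (List Char) := tags.foldl (fun acc o => pvAddProperSubs acc o.toList) PySem.Set.empty
  (tags.zip under).foldl
    (fun kept p =>
      if PySem.Set.contains subs p.1.toList then kept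
      else
        match d.get? p.2 with
        | some vals => if !PySem.Set.isdisjoint under_set vals then kept else kept ++ [p.1]
        | none => kept ++ [p.1])
    []

-- ===== PRECONDITION & SPEC =====
def Spec_remove_overlap_tags (tags : List String) (overlap_tags_dict : List (String × List String)) (out : List String) : Prop := out = remove_overlap_tags_alt tags overlap_tags_dict
instance (tags : List String) (overlap_tags_dict : List (String × List String)) (out : List String) : Decidable (Spec_remove_overlap_tags tags overlap_tags_dict out) := by unfold Spec_remove_overlap_tags; infer_instance

-- ===== CLAIM (what is proved, stated in full; the proofs are below) =====
def Claim_equal_remove_overlap_tags : Prop := ∀ (tags : List String) (overlap_tags_dict : List (String × List String)), Dom_remove_overlap_tags tags overlap_tags_dict → Spec_remove_overlap_tags tags overlap_tags_dict (remove_overlap_tags tags overlap_tags_dict)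

-- ===== LEMMAS AND PROOFS =====

-- membership through a fold that only ever adds elements characterised by Q
lemma pv_mem_foldl_setstep {α β : Type} [BEq α] [LawfulBEq α] (x : α)
    (f : PySem.Set α → β → PySem.Set α) (Q : β → Prop)
    (hf : ∀ acc e, x ∈ f acc e ↔ x ∈ acc ∨ Q e) :
    ∀ (l : List β) (acc : PySem.Set α), x ∈ l.foldl f acc ↔ x ∈ acc ∨ ∃ e ∈ l, Q e := by
  intro l
  induction l with
  | nil => intro acc; simp
  | cons e l ih =>
      intro acc
      rw [List.foldl_cons, ih, hf]
      simp only [List.mem_cons]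
      constructor
      · rintro ((h | h) | ⟨e', he', hq⟩)
        · exact Or.inl h
        · exact Or.inr ⟨e, Or.inl rfl, h⟩
        · exact Or.inr ⟨e', Or.inr he', hq⟩
      · rintro (h | ⟨e', (rfl | he'), hq⟩)
        · exact Or.inl (Or.inl h)
        · exact Or.inl (Or.inr hq)
        · exact Or.inr ⟨e', he', hq⟩

lemma pv_mem_addProperSubs (x : List Char) (acc : PySem.Set (List Char)) (o : List Char) :
    x ∈ pvAddProperSubs acc o ↔
      x ∈ acc ∨ (PySem.Chars.isIn x o = true ∧ x.length < o.length) := by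
  unfold pvAddProperSubs
  rw [pv_mem_foldl_setstep x _
    (fun i => ∃ j ∈ List.range' i (o.length + 1 - i), j - i < o.length ∧ x = (o.drop i).take (j - i))
    (fun acc i => by
      rw [pv_mem_foldl_setstep x _
        (fun j => j - i < o.length ∧ x = (o.drop i).take (j - i))
        (fun acc j => by
          split_ifs with h
          · rw [PySem.Set.mem_add]; tauto
          · tauto)]
    )]
  constructor
  · rintro (h | ⟨i, hi, j, hj, hlt, rfl⟩)
    · exact Or.inl h
    · refine Or.inr ⟨?_, ?_⟩
      · rw [← PySem.Chars.exists_prefix_drop_iff_isIn]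
        exact ⟨i, List.take_prefix _ _⟩
      · rw [List.mem_range'_1] at hj
        simp only [List.length_take, List.length_drop]
        omega
  · rintro (h | ⟨hin, hlen⟩)
    · exact Or.inl h
    · right
      obtain ⟨k, hk⟩ := (PySem.Chars.exists_prefix_drop_iff_isIn x o).mpr hin
      by_cases hk' : k ≤ o.length
      · have hxlen : x.length ≤ o.length - k := by
          have := hk.length_le
          simp only [List.length_drop] at this
          omega
        refine ⟨k, by simp [List.mem_range]; omega,
                k + x.length, by rw [List.mem_range'_1]; omega, by omega, ?_⟩
        have := List.prefix_iff_eq_take.mp hk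
        simpa using this
      · have hdrop : o.drop k = [] := by
          apply List.drop_eq_nil_of_le; omega
        have hx : x = [] := by
          rw [hdrop] at hk
          exact List.prefix_nil.mp hk
        refine ⟨0, by simp [List.mem_range], 0, by rw [List.mem_range'_1]; omega,
                by simp [hx] at hlen ⊢; omega, by simp [hx]⟩

lemma pv_mem_subsFold (x : List Char) (tags : List String) :
    x ∈ tags.foldl (fun acc o => pvAddProperSubs acc o.toList) PySem.Set.empty ↔
      ∃ o ∈ tags, PySem.Chars.isIn x o.toList = true ∧ x.length < o.toList.length := by
  rw [pv_mem_foldl_setstep x _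
    (fun o => PySem.Chars.isIn x o.toList = true ∧ x.length < o.toList.length)
    (fun acc o => pv_mem_addProperSubs x acc o.toList)]
  simp [PySem.Set.empty]

-- "t is a substring of o and t ≠ o" is "t is a substring of o strictly shorter than o"
lemma pv_infix_ne_iff_lt (t o : String) :
    (PySem.Chars.isIn t.toList o.toList = true ∧ t ≠ o) ↔
      (PySem.Chars.isIn t.toList o.toList = true ∧ t.toList.length < o.toList.length) := by
  constructor
  · rintro ⟨h, hne⟩
    refine ⟨h, ?_⟩
    have hsub := ((PySem.Chars.isIn_iff_infix _ _).mp h).sublist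
    rcases lt_or_eq_of_le hsub.length_le with h' | h'
    · exact h'
    · exact absurd (String.toList_inj.mp (hsub.eq_of_length h')) hne
  · rintro ⟨h, hlt⟩
    refine ⟨h, fun hEq => ?_⟩
    subst hEq
    omega

-- B's substring-set test equals A's inner scan over tags
lemma pv_contains_subs_eq_any (t : String) (tags : List String) :
    PySem.Set.contains (tags.foldl (fun acc o => pvAddProperSubs acc o.toList) PySem.Set.empty) t.toList
      = tags.any (fun o => PySem.Str.isIn t o && t != o) := by
  rw [Bool.eq_iff_iff, PySem.Set.contains_iff, pv_mem_subsFold, List.any_eq_true]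
  constructor
  · rintro ⟨o, ho, hin, hlt⟩
    refine ⟨o, ho, ?_⟩
    have := (pv_infix_ne_iff_lt t o).mpr ⟨hin, hlt⟩
    simp only [Bool.and_eq_true, bne_iff_ne]
    exact ⟨by simpa [PySem.Str.isIn] using this.1, this.2⟩
  · rintro ⟨o, ho, h⟩
    simp only [Bool.and_eq_true, bne_iff_ne] at h
    have h' : PySem.Chars.isIn t.toList o.toList = true ∧ t ≠ o :=
      ⟨by simpa [PySem.Str.isIn] using h.1, h.2⟩
    have := (pv_infix_ne_iff_lt t o).mp h'
    exact ⟨o, ho, this.1, this.2⟩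

-- A's nonempty-intersection test equals B's non-disjointness test
lemma pv_inter_ne_iff (vals under : List String) :
    PySem.Set.inter (PySem.Set.ofList vals) (PySem.Set.ofList under) ≠ [] ↔
      PySem.Set.isdisjoint (PySem.Set.ofList under) vals = false := by
  constructor
  · intro h
    obtain ⟨y, hy⟩ := List.exists_mem_of_ne_nil _ h
    simp only [PySem.Set.mem_inter, PySem.Set.mem_ofList] at hy
    rw [← Bool.not_eq_true, PySem.Set.isdisjoint_iff]
    intro hall
    exact hall y (by simp only [PySem.Set.mem_ofList]; exact hy.2) hy.1
  · intro h
    rw [← Bool.not_eq_true, PySem.Set.isdisjoint_iff] at h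
    simp only [not_forall, not_not, exists_prop, PySem.Set.mem_ofList] at h
    obtain ⟨y, hy, hyv⟩ := h
    intro hnil
    have hmem : y ∈ PySem.Set.inter (PySem.Set.ofList vals) (PySem.Set.ofList under) := by
      simp only [PySem.Set.mem_inter, PySem.Set.mem_ofList]
      exact ⟨hyv, hy⟩
    rw [hnil] at hmem
    exact absurd hmem (List.not_mem_nil)

-- ===== VERDICT (by name: the statement is the Claim_ definition above) =====
theorem remove_overlap_tags_spec : Claim_equal_remove_overlap_tags := by
  intro tags otd _
  show remove_overlap_tags tags otd = remove_overlap_tags_alt tags otd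
  unfold remove_overlap_tags remove_overlap_tags_alt
  apply PySem.List.foldl_congr_mem
  intro acc p _
  dsimp only
  rw [pv_contains_subs_eq_any p.1 tags]
  cases hany : tags.any (fun o => PySem.Str.isIn p.1 o && p.1 != o) with
  | true => simp
  | false =>
      cases hg : (PySem.Dict.ofList otd).get? p.2 with
      | none =>
          have hc : (PySem.Dict.ofList otd).contains p.2 = false := by
            rw [PySem.Dict.contains_eq_isSome_get?, hg]; rfl
          simp [hc]
      | some vals =>
          have hc : (PySem.Dict.ofList otd).contains p.2 = true := by
            rw [PySem.Dict.contains_eq_isSome_get?, hg]; rfl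
          have hgd : (PySem.Dict.ofList otd).getD p.2 [] = vals :=
            PySem.Dict.getD_of_get?_eq_some _ _ hg
          simp only [hc, if_true, hgd, Bool.or_false]
          by_cases hI : PySem.Set.inter (PySem.Set.ofList vals)
              (PySem.Set.ofList (tags.map (fun tag => PySem.Str.replace tag " " "_"))) ≠ []
          · have hd := (pv_inter_ne_iff _ _).mp hI
            simp [hI, hd]
          · have hd : PySem.Set.isdisjoint
                (PySem.Set.ofList (tags.map (fun tag => PySem.Str.replace tag " " "_"))) vals = true := by
              rcases Bool.eq_false_or_eq_true (PySem.Set.isdisjoint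
                (PySem.Set.ofList (tags.map (fun tag => PySem.Str.replace tag " " "_"))) vals) with h | h
              · exact h
              · exact absurd ((pv_inter_ne_iff _ _).mpr h) hI
            simp [hI, hd]
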